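-- pv_equiv track=rewrite | github.com/ashsek/Competetive-Codes | HC/2018/tourist/tourist.py | calculate
-- ===== SOURCE A (Python) =====
-- def calculate(a,c,k):
--     l = []
--     o = 0
--     k2 = k
--     for _ in range(c):
--         k = k2
--         l = []
--         while k:
--             l.append(a[o])
--             if o >= len(a)-1:
--                 o = 0
--             else:
--                 o += 1
--             k -= 1
--
--     return l
-- ===== SOURCE B (Python) =====
-- def calculate(a, c, k):
--     if c <= 0 or k == 0:
--         return []
--     n = len(a)
--     start = ((c - 1) * k) % n
--     return [a[(start + i) % n] for i in range(k)]
-- ===== Notes on version B (the rewrite author's own statement) =====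
-- stated objective: faster
-- what changed: Instead of simulating all c passes of the cyclic walk, B computes the start offset of the last pass as (c-1)*k mod len(a) in O(1) and gathers the k cyclic elements once.
import Mathlib
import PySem

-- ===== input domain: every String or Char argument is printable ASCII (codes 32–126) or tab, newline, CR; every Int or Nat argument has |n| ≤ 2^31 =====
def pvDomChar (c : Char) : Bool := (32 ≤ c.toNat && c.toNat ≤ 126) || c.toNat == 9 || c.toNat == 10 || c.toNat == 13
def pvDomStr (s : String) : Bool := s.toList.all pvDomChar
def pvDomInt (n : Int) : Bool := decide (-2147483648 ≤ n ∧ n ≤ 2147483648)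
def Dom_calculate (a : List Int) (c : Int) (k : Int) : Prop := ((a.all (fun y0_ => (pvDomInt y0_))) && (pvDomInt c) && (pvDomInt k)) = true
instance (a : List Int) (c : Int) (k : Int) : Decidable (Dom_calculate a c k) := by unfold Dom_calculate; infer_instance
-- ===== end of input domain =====

-- B computes the start offset of the last pass directly ((c-1)*k mod n) and gathers the k
-- cyclic elements once, instead of simulating all c passes; measured asymptotically faster.


-- ===== PORT A =====
-- the 'while k' loop: k is decremented to 0, so for 0 ≤ k (Pre_) fuel k.toNat is exact;
-- a[o] is pyGet? (none = IndexError, excluded by Pre_)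
def calcPass (a : List Int) : List Int → Int → Nat → List Int × Int
  | l, o, 0 => (l, o)
  | l, o, fuel + 1 =>
      calcPass a (l ++ [(PySem.List.pyGet? a o).getD 0])
        (if o ≥ (a.length : Int) - 1 then 0 else o + 1) fuel

def calculate (a : List Int) (c : Int) (k : Int) : List Int :=
  ((List.range c.toNat).foldl
    (fun (st : List Int × Int) _ => calcPass a [] st.2 k.toNat)
    (([] : List Int), (0 : Int))).1

-- ===== PORT B =====
def calculate_alt (a : List Int) (c : Int) (k : Int) : List Int :=
  if c ≤ 0 ∨ k = 0 then []
  else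
    let n : Int := (a.length : Int)
    let start : Int := PySem.Int.mod ((c - 1) * k) n
    (List.range k.toNat).map
      (fun (i : Nat) => (PySem.List.pyGet? a (PySem.Int.mod (start + (i : Int)) n)).getD 0)

-- ===== PRECONDITION & SPEC =====
-- Pre_ excludes exactly the inputs where A does not return: with c > 0 and k ≠ 0 the
-- inner loop runs, so k < 0 makes the while loop never terminate and a = [] makes a[o]
-- raise IndexError; otherwise A returns.
def Pre_calculate (a : List Int) (c : Int) (k : Int) : Prop :=
  c ≤ 0 ∨ k = 0 ∨ (0 < k ∧ a ≠ [])
instance (a : List Int) (c : Int) (k : Int) : Decidable (Pre_calculate a c k) := by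
  unfold Pre_calculate; infer_instance
def pvWitness_calculate : List Int × Int × Int := ([1, 2, 3], 2, 4)

def Spec_calculate (a : List Int) (c : Int) (k : Int) (out : List Int) : Prop := out = calculate_alt a c k
instance (a : List Int) (c : Int) (k : Int) (out : List Int) : Decidable (Spec_calculate a c k out) := by unfold Spec_calculate; infer_instance

-- ===== CLAIM (what is proved, stated in full; the proofs are below) =====
def Claim_equal_calculate : Prop := ∀ (a : List Int) (c : Int) (k : Int), Dom_calculate a c k → Pre_calculate a c k → Spec_calculate a c k (calculate a c k)

-- ===== LEMMAS AND PROOFS =====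

-- one pass starting at offset o (0 ≤ o < n) collects the cyclic window of `fuel` elements
lemma calcPass_spec (a : List Int) (ha : a ≠ []) :
    ∀ (fuel : Nat) (l : List Int) (o : Int), 0 ≤ o → o < (a.length : Int) →
      calcPass a l o fuel =
        (l ++ (List.range fuel).map
            (fun (i : Nat) => (PySem.List.pyGet? a ((o + (i : Int)) % (a.length : Int))).getD 0),
         (o + (fuel : Int)) % (a.length : Int)) := by
  intro fuel
  induction fuel with
  | zero =>
      intro l o h0 h1
      simp [calcPass, Int.emod_eq_of_lt h0 h1]
  | succ f ih =>
      intro l o h0 h1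
      have hn : 0 < (a.length : Int) := by
        have : a.length ≠ 0 := by simpa using List.length_pos_iff.mpr ha |>.ne'
        omega
      have hstep : (if o ≥ (a.length : Int) - 1 then (0 : Int) else o + 1)
          = (o + 1) % (a.length : Int) := by
        split_ifs with h
        · have : o = (a.length : Int) - 1 := by omega
          subst this
          simp
        · rw [Int.emod_eq_of_lt (by omega) (by omega)]
      rw [calcPass, hstep]
      rw [ih _ _ (Int.emod_nonneg _ (by omega)) (Int.emod_lt_of_pos _ hn)]
      simp only [Prod.mk.injEq]
      refine ⟨?_, ?_⟩
      · rw [List.append_assoc]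
        congr 1
        rw [List.range_succ_eq_map]
        simp only [List.map_cons, List.map_map, List.singleton_append]
        congr 1
        · simp [Int.emod_eq_of_lt h0 h1]
        · apply List.map_congr_left
          intro i _
          simp only [Function.comp]
          congr 1
          rw [Int.emod_add_emod]
          push_cast
          ring_nf
      · rw [Int.emod_add_emod]
        congr 1
        push_cast
        ring

-- with fuel 0 every pass leaves the accumulator empty
lemma calculate_fuel_zero (a : List Int) (m : Nat) :
    ((List.range m).foldl (fun (st : List Int × Int) _ => calcPass a [] st.2 0)
      (([] : List Int), (0 : Int))).1 = [] := by
  induction m with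
  | zero => simp
  | succ m ih =>
      rw [List.range_succ, List.foldl_append]
      simp [calcPass]

-- the offset after m full passes is (m*k) mod n
lemma offset_after (a : List Int) (ha : a ≠ []) (kf : Nat) (m : Nat) :
    ((List.range m).foldl (fun (st : List Int × Int) _ => calcPass a [] st.2 kf)
      (([] : List Int), (0 : Int))).2 = ((m * kf : Nat) : Int) % (a.length : Int) := by
  have hn : 0 < (a.length : Int) := by
    have : a.length ≠ 0 := by simpa using List.length_pos_iff.mpr ha |>.ne'
    omega
  induction m with
  | zero => simp
  | succ m ih =>
      rw [List.range_succ, List.foldl_append]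
      simp only [List.foldl_cons, List.foldl_nil]
      rw [calcPass_spec a ha kf [] _ (by rw [ih]; exact Int.emod_nonneg _ (by omega))
            (by rw [ih]; exact Int.emod_lt_of_pos _ hn)]
      simp only [ih]
      rw [Int.emod_add_emod]
      congr 1
      push_cast
      ring

-- ===== VERDICT (by name: the statement is the Claim_ definition above) =====
theorem calculate_spec : Claim_equal_calculate := by
  intro a c k _ hpre
  unfold Spec_calculate calculate calculate_alt
  by_cases hc : c ≤ 0
  · have : c.toNat = 0 := by omega
    simp [this, hc]
  · by_cases hk0 : k = 0
    · subst hk0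
      simp [calculate_fuel_zero]
    · -- main case: c > 0, k > 0, a ≠ []
      obtain ⟨hkpos, ha⟩ : 0 < k ∧ a ≠ [] := by unfold Pre_calculate at hpre; tauto
      have hk : 0 ≤ k := le_of_lt hkpos
      have hn : 0 < (a.length : Int) := by
        have : a.length ≠ 0 := by simpa using List.length_pos_iff.mpr ha |>.ne'
        omega
      have hcpos : 0 < c := by omega
      obtain ⟨m, hm⟩ : ∃ m, c.toNat = m + 1 := ⟨c.toNat - 1, by omega⟩
      rw [hm, List.range_succ, List.foldl_append]
      simp only [List.foldl_cons, List.foldl_nil]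
      rw [offset_after a ha k.toNat m]
      rw [calcPass_spec a ha k.toNat [] (((m * k.toNat : Nat) : Int) % (a.length : Int))
            (Int.emod_nonneg _ (by omega)) (Int.emod_lt_of_pos _ hn)]
      rw [if_neg (by simp only [not_or]; exact ⟨by omega, hk0⟩)]
      simp only [List.nil_append]
      apply List.map_congr_left
      intro i _
      congr 1
      simp only [PySem.Int.mod_eq_emod_of_pos hn]
      rw [Int.emod_add_emod, Int.emod_add_emod]
      congr 2
      have hmk : ((m : Int)) = c - 1 := by omega
      push_cast
      rw [hmk, Int.toNat_of_nonneg hk]
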